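-- pv_equiv track=rewrite | github.com/iamhollywoodpro/holly-maya-tts | holly_voice_generator.py | unpack_snac_from_7
-- ===== SOURCE A (Python) =====
-- from typing import Optional, List
--
-- CODE_END_TOKEN_ID = 128258
--
-- CODE_TOKEN_OFFSET = 128266
--
-- SNAC_TOKENS_PER_FRAME = 7
--
-- def unpack_snac_from_7(snac_tokens: List[int]) -> List[List[int]]:
--     """Unpack 7-token SNAC frames to 3 hierarchical levels"""
--     if snac_tokens and snac_tokens[-1] == CODE_END_TOKEN_ID:
--         snac_tokens = snac_tokens[:-1]
--
--     frames = len(snac_tokens) // SNAC_TOKENS_PER_FRAME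
--     snac_tokens = snac_tokens[:frames * SNAC_TOKENS_PER_FRAME]
--
--     if frames == 0:
--         return [[], [], []]
--
--     l1, l2, l3 = [], [], []
--
--     for i in range(frames):
--         slots = snac_tokens[i*7:(i+1)*7]
--         l1.append((slots[0] - CODE_TOKEN_OFFSET) % 4096)
--         l2.extend([
--             (slots[1] - CODE_TOKEN_OFFSET) % 4096,
--             (slots[4] - CODE_TOKEN_OFFSET) % 4096,
--         ])
--         l3.extend([
--             (slots[2] - CODE_TOKEN_OFFSET) % 4096,
--             (slots[3] - CODE_TOKEN_OFFSET) % 4096,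
--             (slots[5] - CODE_TOKEN_OFFSET) % 4096,
--             (slots[6] - CODE_TOKEN_OFFSET) % 4096,
--         ])
--
--     return [l1, l2, l3]
-- ===== SOURCE B (Python) =====
-- from typing import List
--
-- CODE_END_TOKEN_ID = 128258
-- CODE_TOKEN_OFFSET = 128266
-- SNAC_TOKENS_PER_FRAME = 7
--
--
-- def unpack_snac_from_7(snac_tokens: List[int]) -> List[List[int]]:
--     """Unpack 7-token SNAC frames to 3 hierarchical levels (column-wise)."""
--     if snac_tokens and snac_tokens[-1] == CODE_END_TOKEN_ID:
--         snac_tokens = snac_tokens[:-1]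
--
--     frames = len(snac_tokens) // SNAC_TOKENS_PER_FRAME
--     vals = [(t - CODE_TOKEN_OFFSET) % 4096
--             for t in snac_tokens[:frames * SNAC_TOKENS_PER_FRAME]]
--
--     l1 = vals[0::7]
--     l2 = [x for pair in zip(vals[1::7], vals[4::7]) for x in pair]
--     l3 = [x for quad in zip(vals[2::7], vals[3::7], vals[5::7], vals[6::7])
--           for x in quad]
--     return [l1, l2, l3]
-- ===== Notes on version B (the rewrite author's own statement) =====
-- stated objective: alternative
-- what changed: Replaces the per-frame loop with three accumulator lists by a single flat normalization pass followed by strided column slices (vals[k::7]) zipped and flattened into the three levels; the frames==0 special case disappears.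
import Mathlib
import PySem

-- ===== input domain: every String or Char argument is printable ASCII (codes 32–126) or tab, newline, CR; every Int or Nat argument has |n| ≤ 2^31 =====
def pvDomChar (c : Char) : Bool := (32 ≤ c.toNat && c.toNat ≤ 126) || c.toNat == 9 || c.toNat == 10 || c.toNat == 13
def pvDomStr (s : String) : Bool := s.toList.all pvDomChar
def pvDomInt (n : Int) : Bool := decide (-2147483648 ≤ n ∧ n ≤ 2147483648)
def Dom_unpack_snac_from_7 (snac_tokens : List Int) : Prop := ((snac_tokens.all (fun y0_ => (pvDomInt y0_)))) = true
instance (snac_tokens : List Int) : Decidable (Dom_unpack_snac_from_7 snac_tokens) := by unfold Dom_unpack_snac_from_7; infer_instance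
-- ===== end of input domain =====

-- B builds the three SNAC levels by one flat normalization pass plus strided column
-- selection (vals[k::7] zipped/flattened) instead of A's per-frame loop with three
-- accumulator lists (objective: alternative decomposition, same O(n) cost).


-- ===== PORT A =====
-- literal port of A: strip trailing end token, truncate to frames*7, then one loop
-- over the frames appending to the three accumulators (slots[k] is always in range
-- after the truncation, so pyGetD's default is never used).
def unpack_snac_from_7 (snac_tokens : List Int) : List (List Int) :=
  let toks :=
    if snac_tokens ≠ [] ∧ PySem.List.pyGet? snac_tokens (-1) = some 128258 then
      PySem.List.slice snac_tokens none (some (-1))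
    else snac_tokens
  let frames : Int := PySem.Int.floordiv (toks.length : Int) 7
  let toks := PySem.List.slice toks none (some (frames * 7))
  if frames = 0 then [[], [], []]
  else
    let r := (PySem.List.pyRange 0 frames 1).foldl
      (fun (st : List Int × List Int × List Int) i =>
        let slots := PySem.List.slice toks (some (i * 7)) (some ((i + 1) * 7))
        (st.1 ++ [PySem.Int.mod (PySem.List.pyGetD slots 0 0 - 128266) 4096],
         st.2.1 ++ [PySem.Int.mod (PySem.List.pyGetD slots 1 0 - 128266) 4096,
                    PySem.Int.mod (PySem.List.pyGetD slots 4 0 - 128266) 4096],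
         st.2.2 ++ [PySem.Int.mod (PySem.List.pyGetD slots 2 0 - 128266) 4096,
                    PySem.Int.mod (PySem.List.pyGetD slots 3 0 - 128266) 4096,
                    PySem.Int.mod (PySem.List.pyGetD slots 5 0 - 128266) 4096,
                    PySem.Int.mod (PySem.List.pyGetD slots 6 0 - 128266) 4096]))
      ([], [], [])
    [r.1, r.2.1, r.2.2]

-- ===== PORT B =====
-- vals[k::7]; the step 7 is never 0, so slice? is always `some`.
def pvStride7 (vals : List Int) (k : Int) : List Int :=
  (PySem.List.slice? vals (some k) none 7).getD []

def unpack_snac_from_7_alt (snac_tokens : List Int) : List (List Int) :=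
  let toks :=
    if snac_tokens ≠ [] ∧ PySem.List.pyGet? snac_tokens (-1) = some 128258 then
      PySem.List.slice snac_tokens none (some (-1))
    else snac_tokens
  let frames : Int := PySem.Int.floordiv (toks.length : Int) 7
  let vals := (PySem.List.slice toks none (some (frames * 7))).map
      (fun v => PySem.Int.mod (v - 128266) 4096)
  let l1 := pvStride7 vals 0
  let l2 := ((pvStride7 vals 1).zip (pvStride7 vals 4)).flatMap (fun p => [p.1, p.2])
  let l3 := ((pvStride7 vals 2).zip ((pvStride7 vals 3).zip
              ((pvStride7 vals 5).zip (pvStride7 vals 6)))).flatMap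
      (fun q => [q.1, q.2.1, q.2.2.1, q.2.2.2])
  [l1, l2, l3]

-- ===== PRECONDITION & SPEC =====
def Spec_unpack_snac_from_7 (snac_tokens : List Int) (out : List (List Int)) : Prop := out = unpack_snac_from_7_alt snac_tokens
instance (snac_tokens : List Int) (out : List (List Int)) : Decidable (Spec_unpack_snac_from_7 snac_tokens out) := by unfold Spec_unpack_snac_from_7; infer_instance

-- ===== CLAIM (what is proved, stated in full; the proofs are below) =====
def Claim_equal_unpack_snac_from_7 : Prop := ∀ (snac_tokens : List Int), Dom_unpack_snac_from_7 snac_tokens → Spec_unpack_snac_from_7 snac_tokens (unpack_snac_from_7 snac_tokens)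

-- ===== LEMMAS AND PROOFS =====

theorem pvStride7_eq (t : List Int) (F : Nat) (k : Int) (ht : t.length = 7 * F)
    (hk0 : 0 ≤ k) (hk : k < 7) :
    pvStride7 t k = (List.range F).map (fun i => t.getD (k.toNat + 7 * i) 0) := by
  simp only [pvStride7, PySem.List.slice?, PySem.List.sliceIndices]
  norm_num
  have hknn : ¬ (k < 0) := by omega
  simp only [if_neg hknn]
  rcases Nat.eq_zero_or_pos F with hF | hFpos
  · have htnil : t = [] := List.eq_nil_of_length_eq_zero (by omega)
    subst htnil
    simp [hF]
  · have hmin : min k ((t.length : Int)) = k := by omega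
    simp only [hmin]
    rw [if_pos (show k < (t.length:Int) by omega)]
    have hcnt : ((((t.length:Int)) - k + 7 - 1)/7).toNat = F := by omega
    rw [hcnt]
    refine List.filterMap_eq_map_iff_forall_eq_some.mpr ?_
    intro x hx
    rw [List.mem_range] at hx
    have hidx : (k + 7 * (x:Int)).toNat = k.toNat + 7*x := by omega
    have hlt : k.toNat + 7*x < t.length := by omega
    rw [hidx]
    simp [List.getElem?_eq_getElem hlt]

theorem pvSlots_get (t : List Int) (F i : Nat) (j : Int) (ht : t.length = 7 * F)
    (hi : i < F) (hj0 : 0 ≤ j) (hj : j < 7) :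
    PySem.List.pyGetD (PySem.List.slice t (some ((i : Int) * 7)) (some (((i : Int) + 1) * 7))) j 0
      = t.getD (j.toNat + 7 * i) 0 := by
  have h1 : ((i:Int)*7) = ((i*7 : Nat) : Int) := by push_cast; ring
  have h2 : ((i:Int)+1)*7 = ((i*7 : Nat) : Int) + ((7:Nat):Int) := by push_cast; ring
  rw [h1, h2, PySem.List.slice_natCast_add]
  have hlen : (List.take 7 (List.drop (i*7) t)).length = 7 := by
    simp [ht]; omega
  rw [PySem.List.pyGetD_eq_getElem _ _ hj0 (by rw [hlen]; omega)]
  rw [List.getElem_take, List.getElem_drop]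
  rw [List.getD_eq_getElem _ _ (by omega)]
  congr 1
  omega

theorem pvGetD_map (t : List Int) (m : Int → Int) (n : Nat) (h : n < t.length) :
    (t.map m).getD n 0 = m (t.getD n 0) := by
  rw [List.getD_eq_getElem _ _ (by simpa using h), List.getElem_map,
      List.getD_eq_getElem _ _ h]

theorem pvAfold (tk : List Int) (l : List Int) (a b c : List Int) :
    l.foldl (fun (st : List Int × List Int × List Int) i =>
        (st.1 ++ [PySem.Int.mod (PySem.List.pyGetD (PySem.List.slice tk (some (i * 7)) (some ((i + 1) * 7))) 0 0 - 128266) 4096],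
         st.2.1 ++ [PySem.Int.mod (PySem.List.pyGetD (PySem.List.slice tk (some (i * 7)) (some ((i + 1) * 7))) 1 0 - 128266) 4096,
                    PySem.Int.mod (PySem.List.pyGetD (PySem.List.slice tk (some (i * 7)) (some ((i + 1) * 7))) 4 0 - 128266) 4096],
         st.2.2 ++ [PySem.Int.mod (PySem.List.pyGetD (PySem.List.slice tk (some (i * 7)) (some ((i + 1) * 7))) 2 0 - 128266) 4096,
                    PySem.Int.mod (PySem.List.pyGetD (PySem.List.slice tk (some (i * 7)) (some ((i + 1) * 7))) 3 0 - 128266) 4096,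
                    PySem.Int.mod (PySem.List.pyGetD (PySem.List.slice tk (some (i * 7)) (some ((i + 1) * 7))) 5 0 - 128266) 4096,
                    PySem.Int.mod (PySem.List.pyGetD (PySem.List.slice tk (some (i * 7)) (some ((i + 1) * 7))) 6 0 - 128266) 4096]))
      (a, b, c)
    = (a ++ l.map (fun i => PySem.Int.mod (PySem.List.pyGetD (PySem.List.slice tk (some (i * 7)) (some ((i + 1) * 7))) 0 0 - 128266) 4096),
       b ++ l.flatMap (fun i => [PySem.Int.mod (PySem.List.pyGetD (PySem.List.slice tk (some (i * 7)) (some ((i + 1) * 7))) 1 0 - 128266) 4096,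
                                 PySem.Int.mod (PySem.List.pyGetD (PySem.List.slice tk (some (i * 7)) (some ((i + 1) * 7))) 4 0 - 128266) 4096]),
       c ++ l.flatMap (fun i => [PySem.Int.mod (PySem.List.pyGetD (PySem.List.slice tk (some (i * 7)) (some ((i + 1) * 7))) 2 0 - 128266) 4096,
                                 PySem.Int.mod (PySem.List.pyGetD (PySem.List.slice tk (some (i * 7)) (some ((i + 1) * 7))) 3 0 - 128266) 4096,
                                 PySem.Int.mod (PySem.List.pyGetD (PySem.List.slice tk (some (i * 7)) (some ((i + 1) * 7))) 5 0 - 128266) 4096,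
                                 PySem.Int.mod (PySem.List.pyGetD (PySem.List.slice tk (some (i * 7)) (some ((i + 1) * 7))) 6 0 - 128266) 4096])) := by
  induction l generalizing a b c with
  | nil => simp
  | cons x xs ih =>
      simp only [List.foldl_cons, List.map_cons, List.flatMap_cons, ih,
        List.append_assoc, List.cons_append, List.nil_append]

theorem pvCore (u : List Int) :
    (let frames : Int := PySem.Int.floordiv (u.length : Int) 7
     let toks := PySem.List.slice u none (some (frames * 7))
     if frames = 0 then ([[], [], []] : List (List Int))
     else
       let r := (PySem.List.pyRange 0 frames 1).foldl
         (fun (st : List Int × List Int × List Int) i =>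
           let slots := PySem.List.slice toks (some (i * 7)) (some ((i + 1) * 7))
           (st.1 ++ [PySem.Int.mod (PySem.List.pyGetD slots 0 0 - 128266) 4096],
            st.2.1 ++ [PySem.Int.mod (PySem.List.pyGetD slots 1 0 - 128266) 4096,
                       PySem.Int.mod (PySem.List.pyGetD slots 4 0 - 128266) 4096],
            st.2.2 ++ [PySem.Int.mod (PySem.List.pyGetD slots 2 0 - 128266) 4096,
                       PySem.Int.mod (PySem.List.pyGetD slots 3 0 - 128266) 4096,
                       PySem.Int.mod (PySem.List.pyGetD slots 5 0 - 128266) 4096,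
                       PySem.Int.mod (PySem.List.pyGetD slots 6 0 - 128266) 4096]))
         ([], [], [])
       [r.1, r.2.1, r.2.2])
    = (let frames : Int := PySem.Int.floordiv (u.length : Int) 7
       let vals := (PySem.List.slice u none (some (frames * 7))).map
           (fun v => PySem.Int.mod (v - 128266) 4096)
       let l1 := pvStride7 vals 0
       let l2 := ((pvStride7 vals 1).zip (pvStride7 vals 4)).flatMap (fun p => [p.1, p.2])
       let l3 := ((pvStride7 vals 2).zip ((pvStride7 vals 3).zip
                   ((pvStride7 vals 5).zip (pvStride7 vals 6)))).flatMap
           (fun q => [q.1, q.2.1, q.2.2.1, q.2.2.2])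
       [l1, l2, l3]) := by
  have hF : PySem.Int.floordiv (u.length : Int) 7 = ((u.length / 7 : Nat) : Int) := by
    rw [PySem.Int.floordiv_eq_ediv_of_pos (by norm_num)]
    exact Eq.symm (Nat.ToInt.div_congr rfl rfl)
  dsimp only
  rw [hF]
  set F : Nat := u.length / 7 with hFdef
  have hmul : ((F : Int) * 7) = ((F * 7 : Nat) : Int) := by push_cast; ring
  rw [hmul, PySem.List.slice_to_natCast]
  set t : List Int := List.take (F * 7) u with htdef
  have hFle : F * 7 ≤ u.length := by omega
  have ht : t.length = 7 * F := by rw [htdef]; simp [List.length_take]; omega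
  have htm : (t.map (fun v => PySem.Int.mod (v - 128266) 4096)).length = 7 * F := by
    simpa using ht
  by_cases h0 : ((F : Int) = 0)
  · have hF0 : F = 0 := by exact_mod_cast h0
    rw [if_pos h0,
        pvStride7_eq _ F 0 htm (by norm_num) (by norm_num),
        pvStride7_eq _ F 1 htm (by norm_num) (by norm_num),
        pvStride7_eq _ F 2 htm (by norm_num) (by norm_num),
        pvStride7_eq _ F 3 htm (by norm_num) (by norm_num),
        pvStride7_eq _ F 4 htm (by norm_num) (by norm_num),
        pvStride7_eq _ F 5 htm (by norm_num) (by norm_num),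
        pvStride7_eq _ F 6 htm (by norm_num) (by norm_num)]
    simp [hF0]
  · rw [if_neg h0]
    rw [pvAfold]
    rw [PySem.List.pyRange_zero_natCast]
    rw [pvStride7_eq _ F 0 htm (by norm_num) (by norm_num),
        pvStride7_eq _ F 1 htm (by norm_num) (by norm_num),
        pvStride7_eq _ F 2 htm (by norm_num) (by norm_num),
        pvStride7_eq _ F 3 htm (by norm_num) (by norm_num),
        pvStride7_eq _ F 4 htm (by norm_num) (by norm_num),
        pvStride7_eq _ F 5 htm (by norm_num) (by norm_num),
        pvStride7_eq _ F 6 htm (by norm_num) (by norm_num)]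
    simp only [List.map_map, List.flatMap_map, List.zip_map',
      List.nil_append, List.cons.injEq, and_true]
    refine ⟨?_, ?_, ?_⟩
    · apply List.map_eq_map_iff.mpr
      intro x hx
      rw [List.mem_range] at hx
      simp only [Function.comp_apply]
      rw [pvSlots_get t F x 0 ht hx (by norm_num) (by norm_num),
          pvGetD_map t _ ((0:Int).toNat + 7*x) (by omega)]
    · apply List.flatMap_congr
      intro x hx
      rw [List.mem_range] at hx
      have e1 := pvSlots_get t F x 1 ht hx (by norm_num) (by norm_num)
      have e4 := pvSlots_get t F x 4 ht hx (by norm_num) (by norm_num)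
      simp [e1, e4, List.getElem?_eq_getElem (show 1+7*x < t.length by omega),
            List.getElem?_eq_getElem (show 4+7*x < t.length by omega)]
    · apply List.flatMap_congr
      intro x hx
      rw [List.mem_range] at hx
      have e2 := pvSlots_get t F x 2 ht hx (by norm_num) (by norm_num)
      have e3 := pvSlots_get t F x 3 ht hx (by norm_num) (by norm_num)
      have e5 := pvSlots_get t F x 5 ht hx (by norm_num) (by norm_num)
      have e6 := pvSlots_get t F x 6 ht hx (by norm_num) (by norm_num)
      simp [e2, e3, e5, e6, List.getElem?_eq_getElem (show 2+7*x < t.length by omega),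
            List.getElem?_eq_getElem (show 3+7*x < t.length by omega),
            List.getElem?_eq_getElem (show 5+7*x < t.length by omega),
            List.getElem?_eq_getElem (show 6+7*x < t.length by omega)]

-- ===== VERDICT (by name: the statement is the Claim_ definition above) =====
theorem unpack_snac_from_7_spec : Claim_equal_unpack_snac_from_7 := by
  intro xs _
  unfold Spec_unpack_snac_from_7 unpack_snac_from_7 unpack_snac_from_7_alt
  exact pvCore _
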